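-- pv_equiv track=rewrite | github.com/AlexandreSAfonso/MyLeetCodesAnswers | HackerRank/_Test findNumOfPairs.py | findNumOfPairs
-- ===== SOURCE A (Python) =====
-- def findNumOfPairs(a, b):
--     # Sort both arrays
--     a.sort()
--     b.sort()
--
--     i, j = 0, 0  # Pointers for both arrays
--     pairs = 0
--
--     # Traverse both arrays
--     while i < len(a) and j < len(b):
--         if a[i] > b[j]:
--             # If a[i] > b[j], we can form a pair
--             pairs += 1
--             j += 1  # Move pointer for b to the next element
--         # Move pointer for a to the next element
--         i += 1
--
--     return pairs
-- ===== SOURCE B (Python) =====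
-- def findNumOfPairs(a, b):
--     a.sort()
--     b.sort()
--     i, j = 0, 0
--     pending = 0   # b-values already passed in the merged sweep, not yet matched
--     count = 0
--     while i < len(a):
--         if j < len(b) and b[j] < a[i]:
--             pending += 1
--             j += 1
--         else:
--             if pending > 0:
--                 count += 1
--                 pending -= 1
--             i += 1
--     return count
-- ===== Notes on version B (the rewrite author's own statement) =====
-- stated objective: alternative
-- what changed: Replaces the greedy two-pointer match (advance a each step, match when a[i] > b[j]) by a single merged ascending sweep over both sorted lists that maintains a balance counter of unmatched b-values and pairs each a-value against that counter.
import Mathlib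
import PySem

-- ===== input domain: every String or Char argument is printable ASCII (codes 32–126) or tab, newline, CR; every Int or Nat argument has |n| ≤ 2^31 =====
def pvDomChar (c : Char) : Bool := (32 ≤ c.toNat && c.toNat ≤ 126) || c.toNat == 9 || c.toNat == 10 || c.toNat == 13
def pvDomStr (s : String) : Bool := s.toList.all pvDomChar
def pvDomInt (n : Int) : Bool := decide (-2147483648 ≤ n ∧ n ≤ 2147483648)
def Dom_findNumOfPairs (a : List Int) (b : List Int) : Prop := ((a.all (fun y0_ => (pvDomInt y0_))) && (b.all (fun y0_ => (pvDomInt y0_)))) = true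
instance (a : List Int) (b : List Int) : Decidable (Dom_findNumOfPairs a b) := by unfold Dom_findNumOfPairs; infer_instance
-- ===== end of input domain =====

-- B replaces A's two-pointer greedy by a merged ascending sweep with an unmatched-b counter;
-- equivalence is about the RETURN value (both Pythons sort a and b in place the same way).

-- ===== PORT A =====
-- the 'while i < len(a) and j < len(b)' loop of A, with its pointers and accumulator
-- (fuel = number of remaining loop iterations bound, for structural recursion only)
def pvLoopA (sa sb : List Int) (fuel : Nat) (i j : Nat) (pairs : Int) : Int :=
  match fuel with
  | 0 => pairs
  | f + 1 =>
    if h : i < sa.length ∧ j < sb.length then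
      if sa[i] > sb[j] then pvLoopA sa sb f (i + 1) (j + 1) (pairs + 1)
      else pvLoopA sa sb f (i + 1) j pairs
    else pairs

def findNumOfPairs (a : List Int) (b : List Int) : Int :=
  pvLoopA (PySem.List.sorted a (fun x => x) false) (PySem.List.sorted b (fun x => x) false)
    a.length 0 0 0

-- ===== PORT B =====
-- B's 'while i < len(a)' sweep: consume b while b[j] < a[i] (pending += 1), else settle a[i]
def pvSweep (fuel : Nat) (sa sb : List Int) (pending : Nat) (count : Int) : Int :=
  match fuel with
  | 0 => count
  | f + 1 =>
    match sa, sb with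
    | [], _ => count
    | x :: xs, y :: ys =>
        if y < x then pvSweep f (x :: xs) ys (pending + 1) count
        else if pending > 0 then pvSweep f xs (y :: ys) (pending - 1) (count + 1)
        else pvSweep f xs (y :: ys) pending count
    | _ :: xs, [] =>
        if pending > 0 then pvSweep f xs [] (pending - 1) (count + 1)
        else pvSweep f xs [] pending count

def findNumOfPairs_alt (a : List Int) (b : List Int) : Int :=
  pvSweep (a.length + b.length)
    (PySem.List.sorted a (fun x => x) false) (PySem.List.sorted b (fun x => x) false) 0 0

-- ===== PRECONDITION & SPEC =====
def Spec_findNumOfPairs (a : List Int) (b : List Int) (out : Int) : Prop := out = findNumOfPairs_alt a b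
instance (a : List Int) (b : List Int) (out : Int) : Decidable (Spec_findNumOfPairs a b out) := by unfold Spec_findNumOfPairs; infer_instance

-- ===== CLAIM (what is proved, stated in full; the proofs are below) =====
def Claim_equal_findNumOfPairs : Prop := ∀ (a : List Int) (b : List Int), Dom_findNumOfPairs a b → Spec_findNumOfPairs a b (findNumOfPairs a b)

-- ===== LEMMAS AND PROOFS =====

-- A's loop, expressed as structural consumption of the two lists (proof device)
def pvMatch : List Int → List Int → Int
  | x :: xs, y :: ys => if x > y then 1 + pvMatch xs ys else pvMatch xs (y :: ys)
  | _, _ => 0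

theorem pvMatch_nil_right (sa : List Int) : pvMatch sa [] = 0 := by
  cases sa <;> rfl

theorem pvMatch_nil_left (sb : List Int) : pvMatch [] sb = 0 := by
  cases sb <;> rfl

theorem pvLoopA_eq_pvMatch (sa sb : List Int) (fuel i j : Nat) (p : Int)
    (hf : sa.length ≤ i + fuel) :
    pvLoopA sa sb fuel i j p = p + pvMatch (sa.drop i) (sb.drop j) := by
  induction fuel generalizing i j p with
  | zero =>
      have hi : sa.length ≤ i := by omega
      rw [List.drop_eq_nil_of_le hi, pvMatch_nil_left]
      simp [pvLoopA]
  | succ f ih =>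
      rw [pvLoopA]
      split
      · rename_i h
        split
        · rename_i hgt
          rw [ih _ _ _ (by omega), List.drop_eq_getElem_cons h.1, List.drop_eq_getElem_cons h.2]
          simp only [pvMatch, if_pos hgt]
          ring
        · rename_i hgt
          rw [ih _ _ _ (by omega), List.drop_eq_getElem_cons h.1, List.drop_eq_getElem_cons h.2]
          simp only [pvMatch, if_neg hgt]
      · rename_i h
        rcases Nat.lt_or_ge i sa.length with hi | hi
        · have hj : sb.length ≤ j := by omega
          rw [List.drop_eq_nil_of_le hj, pvMatch_nil_right]; ring
        · rw [List.drop_eq_nil_of_le hi, pvMatch_nil_left]; ring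

-- key invariant: the sweep with p pending (smaller, unmatched) b's equals A's greedy on
-- the a-suffix past those p guaranteed matches; needs only that sa is sorted ascending
theorem pvSweep_eq (fuel : Nat) (sa sb : List Int) (p : Nat) (c : Int)
    (hf : sa.length + sb.length ≤ fuel)
    (hs : sa.Pairwise (fun u v => u ≤ v)) :
    pvSweep fuel sa sb p c = c + (min p sa.length : Int) + pvMatch (sa.drop p) sb := by
  induction fuel generalizing sa sb p c with
  | zero =>
      have hsa : sa = [] := by
        cases sa with
        | nil => rfl
        | cons _ _ => simp at hf
      subst hsa
      rw [List.drop_nil, pvMatch_nil_left]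
      simp [pvSweep]
  | succ f ih =>
      match sa, sb with
      | [], sb =>
          rw [List.drop_nil, pvMatch_nil_left]; simp [pvSweep]
      | x :: xs, y :: ys =>
          simp only [List.length_cons] at hf
          simp only [pvSweep]
          split
          · rename_i hy
            rw [ih (x :: xs) ys (p + 1) c (by simp only [List.length_cons]; omega) hs]
            rcases Nat.lt_or_ge p (x :: xs).length with hp | hp
            · obtain ⟨z, zs, hzz⟩ : ∃ z zs, (x :: xs).drop p = z :: zs := by
                cases hzz : (x :: xs).drop p with
                | nil => exact absurd (List.drop_eq_nil_iff.mp hzz) (by omega)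
                | cons z zs => exact ⟨z, zs, rfl⟩
              have hz : x ≤ z := by
                have hzm' : z ∈ x :: xs := List.mem_of_mem_drop (hzz ▸ List.mem_cons_self)
                rcases List.mem_cons.mp hzm' with h | h
                · omega
                · exact List.rel_of_pairwise_cons hs h
              have hdrop : (x :: xs).drop (p + 1) = zs := by
                have h2 := congrArg (List.drop 1) hzz
                rw [List.drop_drop] at h2
                simpa using h2
              have hzy : z > y := by omega
              rw [hzz, hdrop]
              simp only [pvMatch, if_pos hzy]
              generalize pvMatch zs ys = m
              simp only [List.length_cons] at hp ⊢
              simp only [min_def]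
              split_ifs <;> omega
            · rw [List.drop_eq_nil_of_le hp, List.drop_eq_nil_of_le (by omega),
                pvMatch_nil_left, pvMatch_nil_left]
              simp only [List.length_cons] at hp ⊢
              simp only [min_def]
              split_ifs <;> omega
          · rename_i hy
            split
            · rename_i hp
              rw [ih xs (y :: ys) (p - 1) (c + 1) (by simp only [List.length_cons]; omega) (List.Pairwise.of_cons hs)]
              have hdrop : (x :: xs).drop p = xs.drop (p - 1) := by
                cases p with
                | zero => omega
                | succ q => simp
              rw [hdrop]
              generalize pvMatch (xs.drop (p - 1)) (y :: ys) = m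
              simp only [List.length_cons]
              simp only [min_def]
              split_ifs <;> omega
            · rename_i hp
              have hp0 : p = 0 := by omega
              subst hp0
              rw [ih xs (y :: ys) 0 c (by simp only [List.length_cons]; omega)
                (List.Pairwise.of_cons hs)]
              simp only [List.drop_zero, pvMatch, if_neg (by omega : ¬ x > y)]
              simp
              omega
      | x :: xs, [] =>
          simp only [List.length_cons] at hf
          simp only [pvSweep]
          split
          · rename_i hp
            rw [ih xs [] (p - 1) (c + 1) (by simp; omega) (List.Pairwise.of_cons hs),
              pvMatch_nil_right, pvMatch_nil_right]
            simp only [List.length_cons]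
            simp only [min_def]
            split_ifs <;> omega
          · rename_i hp
            have hp0 : p = 0 := by omega
            subst hp0
            rw [ih xs [] 0 c (by simp; omega) (List.Pairwise.of_cons hs),
              pvMatch_nil_right, pvMatch_nil_right]
            simp
            omega

-- ===== VERDICT (by name: the statement is the Claim_ definition above) =====
theorem findNumOfPairs_spec : Claim_equal_findNumOfPairs := by
  intro a b _
  unfold Spec_findNumOfPairs findNumOfPairs findNumOfPairs_alt
  rw [pvLoopA_eq_pvMatch _ _ _ _ _ _ (by simp [PySem.List.length_sorted]),
    pvSweep_eq _ _ _ _ _ (by simp [PySem.List.length_sorted])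
      (PySem.List.sorted_pairwise a (fun x => x))]
  simp
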